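-- pv_equiv track=rewrite | github.com/whitecrow0109/CodeStudio | Medium/Sum_Of_Infinite_Array.py | sumInRanges
-- ===== SOURCE A (Python) =====
-- MOD = 1000000007
--
-- def sumInRanges(arr, n, queries, q):
--     ans, thisSum = [], [0] * (n + 5)
--     oneSum = sum(arr)
--     for i in range(n):
--         thisSum[i + 1] = thisSum[i] + arr[i]
--     for i in range(q):
--         L, R = queries[i][0], queries[i][1]
--         L -= 1
--         l, r = L % n, R % n
--         sumVal = (R // n - L // n) * oneSum
--         ans.append((sumVal + thisSum[r] - thisSum[l]) % MOD)
--     return ans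
-- ===== SOURCE B (Python) =====
-- MOD = 1000000007
--
-- def sumInRanges(arr, n, queries, q):
--     oneSum = sum(arr)
--
--     def prefixTotal(x):
--         # sum of the infinite repeated array's first x elements
--         return (x // n) * oneSum + sum(arr[:x % n])
--
--     return [(prefixTotal(queries[i][1]) - prefixTotal(queries[i][0] - 1)) % MOD
--             for i in range(q)]
-- ===== Notes on version B (the rewrite author's own statement) =====
-- stated objective: simpler
-- what changed: Drops A's precomputed prefix-sum table entirely: B answers each query directly via an infinite-prefix formula prefixTotal(x) = (x//n)*sum(arr) + sum(arr[:x%n]) mapped over queries[:q].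
-- outside the precondition, e.g. on sumInRanges([1, 2], -3, [[1, 2]], 1): A returns [1000000004], B returns [1000000005]
import Mathlib
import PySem

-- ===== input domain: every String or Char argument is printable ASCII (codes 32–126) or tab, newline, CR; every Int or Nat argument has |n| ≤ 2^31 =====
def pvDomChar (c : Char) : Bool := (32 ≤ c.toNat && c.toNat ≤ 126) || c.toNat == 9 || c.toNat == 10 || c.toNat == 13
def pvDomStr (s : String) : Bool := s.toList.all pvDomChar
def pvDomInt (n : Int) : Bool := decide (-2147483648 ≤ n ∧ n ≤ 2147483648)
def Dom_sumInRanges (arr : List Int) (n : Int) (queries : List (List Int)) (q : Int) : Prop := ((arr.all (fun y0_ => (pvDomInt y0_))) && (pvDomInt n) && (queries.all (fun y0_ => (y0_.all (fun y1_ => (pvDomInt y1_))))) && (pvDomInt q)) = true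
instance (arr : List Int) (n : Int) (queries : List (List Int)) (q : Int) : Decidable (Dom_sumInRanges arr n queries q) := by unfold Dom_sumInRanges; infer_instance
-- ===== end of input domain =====

-- B replaces A's precomputed prefix-sum table by a direct per-query infinite-prefix formula
-- (simpler: no table is built or maintained; not claimed faster).

def pvMOD : Int := 1000000007

-- ===== PORT A =====
def sumInRanges (arr : List Int) (n : Int) (queries : List (List Int)) (q : Int) : List Int :=
  let ans : List Int := []
  let thisSum : List Int := List.replicate (n + 5).toNat 0
  let oneSum : Int := arr.sum
  let thisSum : List Int := (PySem.List.pyRange 0 n 1).foldl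
    (fun ts i => PySem.List.pySetD ts (i + 1) (PySem.List.pyGetD ts i 0 + PySem.List.pyGetD arr i 0))
    thisSum
  (PySem.List.pyRange 0 q 1).foldl
    (fun ans i =>
      let qi := PySem.List.pyGetD queries i []
      let L := PySem.List.pyGetD qi 0 0
      let R := PySem.List.pyGetD qi 1 0
      let L := L - 1
      let l := PySem.Int.mod L n
      let r := PySem.Int.mod R n
      let sumVal := (PySem.Int.floordiv R n - PySem.Int.floordiv L n) * oneSum
      ans ++ [PySem.Int.mod (sumVal + PySem.List.pyGetD thisSum r 0 - PySem.List.pyGetD thisSum l 0) pvMOD])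
    ans

-- ===== PORT B =====
-- prefixTotal(x) = (x // n) * oneSum + sum(arr[:x % n])
def prefixTotalB (arr : List Int) (n : Int) (oneSum : Int) (x : Int) : Int :=
  PySem.Int.floordiv x n * oneSum + (PySem.List.slice arr none (some (PySem.Int.mod x n))).sum

def sumInRanges_alt (arr : List Int) (n : Int) (queries : List (List Int)) (q : Int) : List Int :=
  let oneSum : Int := arr.sum
  (PySem.List.pyRange 0 q 1).map
    (fun i =>
      PySem.Int.mod
        (prefixTotalB arr n oneSum (PySem.List.pyGetD (PySem.List.pyGetD queries i []) 1 0)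
          - prefixTotalB arr n oneSum (PySem.List.pyGetD (PySem.List.pyGetD queries i []) 0 0 - 1)) pvMOD)

-- ===== PRECONDITION & SPEC =====
-- Pre_ is the natural domain of the task: whenever any query is actually answered (q > 0) n must be a
-- positive prefix length of arr and the first q queries well-formed 2-entry pairs. Outside it A raises
-- (ZeroDivisionError for n = 0, IndexError for n > len(arr), q > len(queries) or a short query row) or,
-- for small negative n with q > 0, returns accidental values via Python's negative modulo/index wraparound.
def Pre_sumInRanges (arr : List Int) (n : Int) (queries : List (List Int)) (q : Int) : Prop :=
  n ≤ (arr.length : Int) ∧ q ≤ (queries.length : Int) ∧ (0 < n ∨ q ≤ 0) ∧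
    ∀ row ∈ queries.take q.toNat, 2 ≤ row.length
instance (arr : List Int) (n : Int) (queries : List (List Int)) (q : Int) : Decidable (Pre_sumInRanges arr n queries q) := by unfold Pre_sumInRanges; infer_instance

def pvWitness_sumInRanges : List Int × Int × List (List Int) × Int := ([1, 2, 3], 3, [[1, 4], [2, 2]], 2)

def Spec_sumInRanges (arr : List Int) (n : Int) (queries : List (List Int)) (q : Int) (out : List Int) : Prop := out = sumInRanges_alt arr n queries q
instance (arr : List Int) (n : Int) (queries : List (List Int)) (q : Int) (out : List Int) : Decidable (Spec_sumInRanges arr n queries q out) := by unfold Spec_sumInRanges; infer_instance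

-- ===== CLAIM (what is proved, stated in full; the proofs are below) =====
def Claim_equal_sumInRanges : Prop := ∀ (arr : List Int) (n : Int) (queries : List (List Int)) (q : Int), Dom_sumInRanges arr n queries q → Pre_sumInRanges arr n queries q → Spec_sumInRanges arr n queries q (sumInRanges arr n queries q)

-- ===== LEMMAS AND PROOFS =====

-- the A-side table after processing range(m): entry k (k ≤ m) holds sum(arr[:k])
lemma tableA_spec (arr : List Int) (n : Int) (hn : 0 < n) (hlen : n ≤ (arr.length : Int))
    (m : Nat) (hm : (m : Int) ≤ n) :
    ((PySem.List.pyRange 0 (m : Int) 1).foldl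
      (fun ts i => PySem.List.pySetD ts (i + 1) (PySem.List.pyGetD ts i 0 + PySem.List.pyGetD arr i 0))
      (List.replicate (n + 5).toNat 0)).length = (n + 5).toNat ∧
    ∀ k : Nat, k ≤ m →
      ((PySem.List.pyRange 0 (m : Int) 1).foldl
        (fun ts i => PySem.List.pySetD ts (i + 1) (PySem.List.pyGetD ts i 0 + PySem.List.pyGetD arr i 0))
        (List.replicate (n + 5).toNat 0)).getD k 0 = (arr.take k).sum := by
  induction m with
  | zero =>
      constructor
      · simp [PySem.List.pyRange_one_eq_nil]
      · intro k hk
        interval_cases k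
        simp [PySem.List.pyRange_one_eq_nil, List.getD]
  | succ m ih =>
      obtain ⟨ihlen, ihget⟩ := ih (by push_cast at hm ⊢; omega)
      have hrange : PySem.List.pyRange 0 ((m : Int) + 1) 1
          = PySem.List.pyRange 0 (m : Int) 1 ++ [(m : Int)] :=
        PySem.List.pyRange_one_succ_right (by positivity)
      have hmlt : (m : Int) < (arr.length : Int) := by omega
      have hm1lt : m + 1 < (n + 5).toNat := by omega
      push_cast
      rw [hrange, List.foldl_append]
      set ts := (PySem.List.pyRange 0 (m : Int) 1).foldl
        (fun ts i => PySem.List.pySetD ts (i + 1) (PySem.List.pyGetD ts i 0 + PySem.List.pyGetD arr i 0))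
        (List.replicate (n + 5).toNat 0) with hts
      simp only [List.foldl_cons, List.foldl_nil]
      have hset : PySem.List.pySetD ts ((m : Int) + 1) (PySem.List.pyGetD ts (m : Int) 0 + PySem.List.pyGetD arr (m : Int) 0)
          = ts.set (m + 1) (PySem.List.pyGetD ts (m : Int) 0 + PySem.List.pyGetD arr (m : Int) 0) := by
        have := PySem.List.pySetD_of_nonneg (xs := ts) (i := (m : Int) + 1)
          (v := PySem.List.pyGetD ts (m : Int) 0 + PySem.List.pyGetD arr (m : Int) 0) (by omega)
        simpa using this
      rw [hset]
      have hval : PySem.List.pyGetD ts (m : Int) 0 + PySem.List.pyGetD arr (m : Int) 0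
          = (arr.take (m + 1)).sum := by
        have hmlen : m < arr.length := by exact_mod_cast hmlt
        rw [PySem.List.pyGetD_natCast ts m 0, PySem.List.pyGetD_natCast arr m 0,
          ihget m le_rfl, List.getD_eq_getElem arr 0 hmlen, List.sum_take_succ arr m hmlen]
      constructor
      · simp [ihlen]
      · intro k hk
        rw [hval]
        by_cases hke : k = m + 1
        · subst hke
          rw [List.getD_eq_getElem _ 0 (by rw [List.length_set, ihlen]; exact hm1lt)]
          simp
        · have hkm : k ≤ m := by omega
          rw [List.getD_eq_getElem _ 0 (by rw [List.length_set, ihlen]; omega),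
            List.getElem_set_ne (by omega), ← List.getD_eq_getElem _ 0 (by rw [ihlen]; omega)]
          exact ihget k hkm

-- ===== VERDICT =====
theorem sumInRanges_spec : Claim_equal_sumInRanges := by
  intro arr n queries q _hDom hPre
  obtain ⟨hlen, hqlen, hnq, _hrows⟩ := hPre
  unfold Spec_sumInRanges sumInRanges sumInRanges_alt
  simp only []
  set ts := (PySem.List.pyRange 0 n 1).foldl
    (fun ts i => PySem.List.pySetD ts (i + 1) (PySem.List.pyGetD ts i 0 + PySem.List.pyGetD arr i 0))
    (List.replicate (n + 5).toNat 0) with hts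
  -- A's answer loop is a map over the same index range B maps over
  rw [PySem.List.foldl_append_singleton_eq_map, List.nil_append]
  apply List.map_congr_left
  intro i hi
  obtain ⟨hi0, hiq⟩ := PySem.List.mem_pyRange_one.mp hi
  -- a query is answered, so by Pre_ we are in the 0 < n ≤ len arr regime
  have hn : 0 < n := by rcases hnq with h | h; exact h; omega
  -- characterize the A-side table
  obtain ⟨htlen, htget⟩ := tableA_spec arr n hn hlen n.toNat (by omega)
  rw [show ((n.toNat : Nat) : Int) = n from by omega] at htlen htget
  rw [← hts] at htlen htget
  -- each table read is a prefix sum of arr, i.e. B's slice sum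
  have hread : ∀ x : Int, PySem.List.pyGetD ts (PySem.Int.mod x n) 0
      = (PySem.List.slice arr none (some (PySem.Int.mod x n))).sum := by
    intro x
    have h0 : 0 ≤ PySem.Int.mod x n := PySem.Int.mod_nonneg x (by omega)
    have hlt : PySem.Int.mod x n < n := PySem.Int.mod_lt x (by omega)
    have hge : PySem.List.pyGetD ts (PySem.Int.mod x n) 0 = ts.getD (PySem.Int.mod x n).toNat 0 := by
      rw [show PySem.Int.mod x n = (((PySem.Int.mod x n).toNat : Nat) : Int) from by omega,
        PySem.List.pyGetD_natCast]
      rw [show (((PySem.Int.mod x n).toNat : Int)).toNat = (PySem.Int.mod x n).toNat from by omega]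
    rw [hge, htget (PySem.Int.mod x n).toNat (by omega), PySem.List.slice_to arr h0]
  rw [hread (PySem.List.pyGetD (PySem.List.pyGetD queries i []) 1 0),
    hread (PySem.List.pyGetD (PySem.List.pyGetD queries i []) 0 0 - 1)]
  unfold prefixTotalB
  congr 1
  ring
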